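-- pv_equiv track=rewrite | github.com/AmeShajid/FreshmanYear-HW2 | HW07_game.py | checkStraight
-- ===== SOURCE A (Python) =====
-- def checkStraight(myList):
--     if len(myList) < 4:  # If the list has fewer than 4 items, return 0
--         return 0
--
--     sorted_list = sorted(myList)  # Sort the list to make it easier to find consecutive numbers
--     for i in range(len(sorted_list) - 3):  # Loop through the list up to the fourth-to-last item
--         if (sorted_list[i + 1] == sorted_list[i] + 1 and
--             sorted_list[i + 2] == sorted_list[i] + 2 and
--             sorted_list[i + 3] == sorted_list[i] + 3):  # Check if four consecutive numbers are found
--             return 45  # If so, return a score of 45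
--     return 0  # Otherwise, return 0
-- ===== SOURCE B (Python) =====
-- def checkStraight(myList):
--     s = sorted(myList)
--     if not s:
--         return 0
--     prev = s[0]
--     run = 1
--     for x in s[1:]:
--         run = run + 1 if x == prev + 1 else 1
--         if run == 4:
--             return 45
--         prev = x
--     return 0
-- ===== Notes on version B (the rewrite author's own statement) =====
-- stated objective: alternative
-- what changed: Replaces the windowed four-element comparison over indices with a single adjacent-pair pass that maintains a running consecutive-run counter (reset on gaps and duplicates), returning 45 the moment the run reaches 4.
import Mathlib
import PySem

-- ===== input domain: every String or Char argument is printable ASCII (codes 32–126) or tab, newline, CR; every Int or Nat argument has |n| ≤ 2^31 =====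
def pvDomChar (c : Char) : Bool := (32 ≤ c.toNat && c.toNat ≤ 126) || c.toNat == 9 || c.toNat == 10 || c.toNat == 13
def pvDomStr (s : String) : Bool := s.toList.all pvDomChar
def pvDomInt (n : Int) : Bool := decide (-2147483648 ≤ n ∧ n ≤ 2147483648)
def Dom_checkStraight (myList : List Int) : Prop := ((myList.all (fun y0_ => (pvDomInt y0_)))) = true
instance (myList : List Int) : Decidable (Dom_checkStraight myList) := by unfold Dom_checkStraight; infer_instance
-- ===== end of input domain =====

-- B replaces A's windowed four-element index scan with a single adjacent-pair pass
-- keeping a running consecutive-run counter (alternative decomposition, same cost).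

-- ===== PORT A =====
-- the for-loop with early return, over the index list; indices produced by the
-- range are always in range, so the unreachable `none` arm returns 0
def checkStraightLoop (sorted_list : List Int) : List Int → Int
  | [] => 0
  | i :: rest =>
    match PySem.List.pyGet? sorted_list i with
    | none => 0
    | some a =>
      if PySem.List.pyGet? sorted_list (i + 1) = some (a + 1) ∧
         PySem.List.pyGet? sorted_list (i + 2) = some (a + 2) ∧
         PySem.List.pyGet? sorted_list (i + 3) = some (a + 3) then 45
      else checkStraightLoop sorted_list rest

def checkStraight (myList : List Int) : Int :=
  if myList.length < 4 then 0
  else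
    let sorted_list := PySem.List.sorted myList (fun x => x) false
    checkStraightLoop sorted_list (PySem.List.pyRange 0 ((sorted_list.length : Int) - 3) 1)

-- ===== PORT B =====
-- the running-run-length pass of Source B (prev, run over the tail of the sorted list)
def csRun (prev run : Int) : List Int → Int
  | [] => 0
  | x :: rest =>
    let run' := if x = prev + 1 then run + 1 else 1
    if run' = 4 then 45
    else csRun x run' rest

def checkStraight_alt (myList : List Int) : Int :=
  match PySem.List.sorted myList (fun x => x) false with
  | [] => 0
  | p :: t => csRun p 1 t

-- ===== PRECONDITION & SPEC =====
def Spec_checkStraight (myList : List Int) (out : Int) : Prop := out = checkStraight_alt myList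
instance (myList : List Int) (out : Int) : Decidable (Spec_checkStraight myList out) := by unfold Spec_checkStraight; infer_instance

-- ===== CLAIM (what is proved, stated in full; the proofs are below) =====
def Claim_equal_checkStraight : Prop := ∀ (myList : List Int), Dom_checkStraight myList → Spec_checkStraight myList (checkStraight myList)

-- ===== LEMMAS AND PROOFS =====

-- whether the next k elements of the list continue p+1, p+2, …
def chainK (p : Int) : Nat → List Int → Bool
  | 0, _ => true
  | _ + 1, [] => false
  | k + 1, x :: t => x = p + 1 && chainK x k t

-- whether the list contains four consecutive elements x, x+1, x+2, x+3 somewhere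
def hasStraight : List Int → Bool
  | [] => false
  | p :: t => chainK p 3 t || hasStraight t

theorem hasStraight_short (l : List Int) (h : l.length < 4) : hasStraight l = false := by
  rcases l with _ | ⟨a, _ | ⟨b, _ | ⟨c, _ | ⟨d, t⟩⟩⟩⟩ <;> simp_all [hasStraight, chainK]; omega

theorem chainK_two_imp_one (p : Int) (t : List Int)
    (h : chainK p 2 t = true) : chainK p 1 t = true := by
  rcases t with _ | ⟨a, _ | ⟨b, t⟩⟩ <;> simp_all [chainK]

theorem csRun_eq (t : List Int) : ∀ (p : Int) (r : Nat), 1 ≤ r → r ≤ 3 →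
    csRun p (r : Int) t = if (chainK p (4 - r) t || hasStraight (p :: t)) then 45 else 0 := by
  induction t with
  | nil =>
    intro p r h1 h3
    interval_cases r <;> norm_num [csRun, chainK, hasStraight]
  | cons x rest ih =>
    intro p r h1 h3
    by_cases hx : x = p + 1
    · subst hx
      interval_cases r
      · -- r = 1 : run becomes 2
        have hstep : csRun p ((1 : Nat) : Int) ((p + 1) :: rest) = csRun (p + 1) ((2 : Nat) : Int) rest := by
          norm_num [csRun]
        rw [hstep, ih (p + 1) 2 (by norm_num) (by norm_num)]
        have hcond : (chainK p 3 ((p + 1) :: rest) || hasStraight (p :: (p + 1) :: rest))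
            = (chainK (p + 1) 2 rest || hasStraight ((p + 1) :: rest)) := by
          cases h2 : chainK (p + 1) 2 rest <;> simp [hasStraight, chainK, h2]
        rw [show (4 : Nat) - 1 = 3 from rfl, hcond]
      · -- r = 2 : run becomes 3
        have hstep : csRun p ((2 : Nat) : Int) ((p + 1) :: rest) = csRun (p + 1) ((3 : Nat) : Int) rest := by
          norm_num [csRun]
        rw [hstep, ih (p + 1) 3 (by norm_num) (by norm_num)]
        have hcond : (chainK p 2 ((p + 1) :: rest) || hasStraight (p :: (p + 1) :: rest))
            = (chainK (p + 1) 1 rest || hasStraight ((p + 1) :: rest)) := by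
          by_cases h2 : chainK (p + 1) 2 rest = true
          · have h1' := chainK_two_imp_one _ _ h2
            simp [hasStraight, chainK, h1', h2]
          · simp only [Bool.not_eq_true] at h2
            simp [hasStraight, chainK, h2]
        rw [show (4 : Nat) - 2 = 2 from rfl, hcond]
      · -- r = 3 : run reaches 4
        have hstep : csRun p ((3 : Nat) : Int) ((p + 1) :: rest) = 45 := by
          norm_num [csRun]
        rw [hstep, show (4 : Nat) - 3 = 1 from rfl]
        have : chainK p 1 ((p + 1) :: rest) = true := by simp [chainK]
        simp [this]
    · -- x ≠ p + 1 : run resets to 1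
      have hstep : csRun p (r : Int) (x :: rest) = csRun x ((1 : Nat) : Int) rest := by
        norm_num [csRun, hx]
      rw [hstep, ih x 1 (by norm_num) (by norm_num)]
      have hch : ∀ k, chainK p (k + 1) (x :: rest) = false := by
        intro k; simp [chainK, hx]
      have hr : 4 - r = (4 - r - 1) + 1 := by omega
      rw [hr]
      simp only [hasStraight, hch, Bool.false_or]
      rw [show (4 : Nat) - 1 = 3 from rfl]
      by_cases hcx : chainK x 3 rest = true
      · simp [hcx]
      · simp only [Bool.not_eq_true] at hcx
        simp [hcx]

theorem alt_eq (myList : List Int) :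
    checkStraight_alt myList =
      if hasStraight (PySem.List.sorted myList (fun x => x) false) then 45 else 0 := by
  unfold checkStraight_alt
  rcases h : PySem.List.sorted myList (fun x => x) false with _ | ⟨p, t⟩
  · simp [hasStraight]
  · have hm : (match p :: t with | [] => (0 : Int) | p :: t => csRun p 1 t) = csRun p 1 t := rfl
    rw [hm, show (1 : Int) = ((1 : Nat) : Int) by norm_num,
        csRun_eq t p 1 (by norm_num) (by norm_num)]
    have hcond : (chainK p (4 - 1) t || hasStraight (p :: t)) = hasStraight (p :: t) := by
      cases hc : chainK p 3 t <;> simp [hasStraight, hc]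
    rw [hcond]

theorem loop_eq (k : Nat) : ∀ (j : Nat) (s : List Int), s.length ≤ j + k →
    checkStraightLoop s (PySem.List.pyRange (j : Int) ((s.length : Int) - 3) 1) =
      if hasStraight (s.drop j) then 45 else 0 := by
  induction k with
  | zero =>
    intro j s hle
    rw [PySem.List.pyRange_one_eq_nil (by omega)]
    have : (s.drop j).length < 4 := by simp; omega
    simp [checkStraightLoop, hasStraight_short _ this]
  | succ k ih =>
    intro j s hle
    by_cases h : (j : Int) < (s.length : Int) - 3
    · have hj3 : j + 3 < s.length := by omega
      have hj0 : j < s.length := by omega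
      have hj1 : j + 1 < s.length := by omega
      have hj2 : j + 2 < s.length := by omega
      rw [PySem.List.pyRange_one_cons h]
      have g0 : PySem.List.pyGet? s (j : Int) = some s[j] := by
        rw [PySem.List.pyGet?_natCast]; simp [hj0]
      have g1 : PySem.List.pyGet? s ((j : Int) + 1) = some s[j + 1] := by
        rw [show ((j : Int) + 1) = ((j + 1 : Nat) : Int) by push_cast; ring,
            PySem.List.pyGet?_natCast]
        simp [hj1]
      have g2 : PySem.List.pyGet? s ((j : Int) + 2) = some s[j + 2] := by
        rw [show ((j : Int) + 2) = ((j + 2 : Nat) : Int) by push_cast; ring,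
            PySem.List.pyGet?_natCast]
        simp [hj2]
      have g3 : PySem.List.pyGet? s ((j : Int) + 3) = some s[j + 3] := by
        rw [show ((j : Int) + 3) = ((j + 3 : Nat) : Int) by push_cast; ring,
            PySem.List.pyGet?_natCast]
        simp [hj3]
      have hdrop : ∀ (m : Nat) (hm : m < s.length), s.drop m = s[m]'hm :: s.drop (m + 1) :=
        fun m hm => List.drop_eq_getElem_cons hm
      have hd1 : s.drop (j + 1) = s[j + 1] :: s[j + 2] :: s[j + 3] :: s.drop (j + 4) := by
        have e2 : s.drop (j + 1 + 1) = s.drop (j + 2) := by congr 1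
        have e3 : s.drop (j + 2 + 1) = s.drop (j + 3) := by congr 1
        have e4 : s.drop (j + 3 + 1) = s.drop (j + 4) := by congr 1
        rw [hdrop (j + 1) hj1, e2, hdrop (j + 2) hj2, e3, hdrop (j + 3) hj3, e4]
      have hhs : hasStraight (s.drop j)
          = (chainK s[j] 3 (s.drop (j + 1)) || hasStraight (s.drop (j + 1))) := by
        conv_lhs => rw [hdrop j hj0]
        simp only [hasStraight]
      simp only [checkStraightLoop, g0, g1, g2, g3, Option.some.injEq]
      by_cases hc : s[j + 1] = s[j] + 1 ∧ s[j + 2] = s[j] + 2 ∧ s[j + 3] = s[j] + 3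
      · rw [if_pos hc]
        obtain ⟨hc1, hc2, hc3⟩ := hc
        have h45 : hasStraight (s.drop j) = true := by
          rw [hhs, hd1]
          simp only [chainK, Bool.or_eq_true, Bool.and_eq_true, decide_eq_true_eq]
          exact Or.inl ⟨by omega, by omega, by omega, trivial⟩
        rw [h45]
        rfl
      · rw [if_neg hc,
            show ((j : Int) + 1) = ((j + 1 : Nat) : Int) by push_cast; ring,
            ih (j + 1) s (by omega)]
        have hck : chainK s[j] 3 (s.drop (j + 1)) = false := by
          rw [hd1]
          by_contra hb
          simp only [chainK, Bool.not_eq_false, Bool.and_eq_true, decide_eq_true_eq] at hb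
          obtain ⟨b1, b2, b3, -⟩ := hb
          exact hc ⟨by omega, by omega, by omega⟩
        rw [hhs, hck, Bool.false_or]
    · rw [PySem.List.pyRange_one_eq_nil (by omega)]
      have : (s.drop j).length < 4 := by simp; omega
      simp [checkStraightLoop, hasStraight_short _ this]

-- ===== VERDICT (by name: the statement is the Claim_ definition above) =====
theorem checkStraight_spec : Claim_equal_checkStraight := by
  intro myList _
  unfold Spec_checkStraight checkStraight
  rw [alt_eq]
  by_cases hlen : myList.length < 4
  · rw [if_pos hlen, hasStraight_short, if_neg (by simp)]
    rw [PySem.List.length_sorted]; omega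
  · rw [if_neg hlen]
    have hl : (PySem.List.sorted myList (fun x => x) false).length = myList.length :=
      PySem.List.length_sorted _ _ _
    have := loop_eq (PySem.List.sorted myList (fun x => x) false).length 0
      (PySem.List.sorted myList (fun x => x) false) (by omega)
    simpa using this
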